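-- pv_equiv track=rewrite | github.com/saareu/news-mvp | src/news_mvp/etl/load/enhancer_by_source.py | parse_fallback_selectors
-- ===== SOURCE A (Python) =====
-- def parse_fallback_selectors(spec: str) -> list[str]:
--     """Parse fallback selector syntax with [] brackets.
--
--     Example: '[selector1],[selector2]' -> ['selector1', 'selector2']
--     Example: 'selector' -> ['selector']
--     """
--     if not spec:
--         return []
--
--     spec = spec.strip()
--     if not (spec.startswith("[") and "]" in spec):
--         return [spec]
--
--     # Extract content within brackets and split by ],[
--     selectors = []
--     current = ""
--     in_bracket = False
--     i = 0
--
--     while i < len(spec):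
--         char = spec[i]
--         if char == "[":
--             in_bracket = True
--             current = ""
--         elif char == "]":
--             if in_bracket and current.strip():
--                 selectors.append(current.strip())
--             in_bracket = False
--             current = ""
--         elif char == "," and not in_bracket:
--             # Skip comma outside brackets
--             pass
--         elif in_bracket:
--             current += char
--         i += 1
--
--     return selectors if selectors else [spec]
-- ===== SOURCE B (Python) =====
-- import re
--
--
-- def parse_fallback_selectors(spec: str) -> list[str]:
--     """Parse fallback selector syntax with [] brackets."""
--     if not spec:
--         return []
--
--     spec = spec.strip()
--     if not (spec.startswith("[") and "]" in spec):
--         return [spec]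
--
--     # A bracketed selector is a maximal bracket-free run enclosed in [ ... ].
--     matches = re.findall(r"\[([^\[\]]*)\]", spec)
--     selectors = [m.strip() for m in matches if m.strip()]
--     return selectors if selectors else [spec]
-- ===== Notes on version B (the rewrite author's own statement) =====
-- stated objective: idiomatic
-- what changed: Replaces the hand-written character-by-character state machine (in_bracket flag, accumulator string) with a single regex findall of bracket-free bracketed groups followed by a strip-and-filter comprehension.
import Mathlib
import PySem

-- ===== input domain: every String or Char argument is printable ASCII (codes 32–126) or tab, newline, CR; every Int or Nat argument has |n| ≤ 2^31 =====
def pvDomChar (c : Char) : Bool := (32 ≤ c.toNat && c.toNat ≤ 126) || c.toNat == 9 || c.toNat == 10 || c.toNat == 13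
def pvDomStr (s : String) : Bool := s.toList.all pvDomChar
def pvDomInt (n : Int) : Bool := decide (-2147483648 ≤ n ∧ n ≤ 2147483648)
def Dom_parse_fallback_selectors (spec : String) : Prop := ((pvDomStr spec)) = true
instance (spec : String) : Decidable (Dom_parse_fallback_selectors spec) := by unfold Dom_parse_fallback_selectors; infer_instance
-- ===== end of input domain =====

-- B replaces A's character-by-character in_bracket state machine with a regex-findall of
-- bracket-free bracketed groups plus a strip-and-filter comprehension (idiomatic, same cost).

-- ===== PORT A =====
-- the while loop, state (selectors, current, in_bracket), one step per character
def pfsLoopA : List Char → List String → List Char → Bool → List String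
  | [], sel, _cur, _inb => sel
  | c :: rest, sel, cur, inb =>
    if c = '[' then pfsLoopA rest sel [] true
    else if c = ']' then
      if inb = true ∧ PySem.Chars.strip cur ≠ [] then
        pfsLoopA rest (sel ++ [String.ofList (PySem.Chars.strip cur)]) [] false
      else pfsLoopA rest sel [] false
    else if c = ',' ∧ inb = false then pfsLoopA rest sel cur inb
    else if inb = true then pfsLoopA rest sel (cur ++ [c]) inb
    else pfsLoopA rest sel cur inb

def parse_fallback_selectors (spec : String) : List String :=
  if spec = "" then []
  else
    let s := PySem.Str.strip spec
    if !(PySem.Str.startswith s "[" && PySem.Str.isIn "]" s) then [s]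
    else
      let selectors := pfsLoopA s.toList [] [] false
      if selectors ≠ [] then selectors else [s]

-- ===== PORT B =====
-- re.findall(r"\[([^\[\]]*)\]", spec): at each '[', the maximal bracket-free run;
-- a match iff that run is closed by ']'; a failed attempt resumes scanning at the breaking char
def pfsFindall (cs : List Char) : List (List Char) :=
  match cs with
  | [] => []
  | c :: rest =>
    if c = '[' then
      let body := rest.takeWhile (fun d => d != '[' && d != ']')
      match h : rest.dropWhile (fun d => d != '[' && d != ']') with
      | ']' :: rest' => body :: pfsFindall rest'
      | other => pfsFindall other
    else pfsFindall rest
termination_by cs.length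
decreasing_by
  · have := (rest.dropWhile_sublist (fun d => d != '[' && d != ']')).length_le
    rw [h] at this; simp at this ⊢; omega
  · have := (rest.dropWhile_sublist (fun d => d != '[' && d != ']')).length_le
    rw [h] at this; simp at this ⊢; omega
  · simp

def parse_fallback_selectors_alt (spec : String) : List String :=
  if spec = "" then []
  else
    let s := PySem.Str.strip spec
    if !(PySem.Str.startswith s "[" && PySem.Str.isIn "]" s) then [s]
    else
      let ms := pfsFindall s.toList
      let selectors := (ms.filter (fun m => PySem.Chars.strip m ≠ [])).map
        (fun m => String.ofList (PySem.Chars.strip m))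
      if selectors ≠ [] then selectors else [s]

-- ===== PRECONDITION & SPEC =====
def Spec_parse_fallback_selectors (spec : String) (out : List String) : Prop := out = parse_fallback_selectors_alt spec
instance (spec : String) (out : List String) : Decidable (Spec_parse_fallback_selectors spec out) := by unfold Spec_parse_fallback_selectors; infer_instance

-- ===== CLAIM (what is proved, stated in full; the proofs are below) =====
def Claim_equal_parse_fallback_selectors : Prop := ∀ (spec : String), Dom_parse_fallback_selectors spec → Spec_parse_fallback_selectors spec (parse_fallback_selectors spec)

-- ===== LEMMAS AND PROOFS =====

def pfsEmit (cs : List Char) : List String :=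
  ((pfsFindall cs).filter (fun m => PySem.Chars.strip m ≠ [])).map
    (fun m => String.ofList (PySem.Chars.strip m))

lemma pfs_findall_nil : pfsFindall [] = [] := by simp [pfsFindall]

lemma pfs_findall_cons_ne (c : Char) (rest : List Char) (h : ¬ c = '[') :
    pfsFindall (c :: rest) = pfsFindall rest := by
  rw [pfsFindall]; simp [h]

lemma pfs_drop_all (cur : List Char) (x : Char) (t : List Char)
    (h : cur.all (fun d => d != '[' && d != ']') = true)
    (hx : (x != '[' && x != ']') = false) :
    (cur ++ x :: t).dropWhile (fun d => d != '[' && d != ']') = x :: t := by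
  induction cur with
  | nil => simp [hx]
  | cons a l ih =>
    simp only [List.all_cons, Bool.and_eq_true] at h
    simp [h.1, ih h.2]

lemma pfs_take_all (cur : List Char) (x : Char) (t : List Char)
    (h : cur.all (fun d => d != '[' && d != ']') = true)
    (hx : (x != '[' && x != ']') = false) :
    (cur ++ x :: t).takeWhile (fun d => d != '[' && d != ']') = cur := by
  induction cur with
  | nil => simp [hx]
  | cons a l ih =>
    simp only [List.all_cons, Bool.and_eq_true] at h
    simp [h.1, ih h.2]

lemma pfs_findall_lb_lb (cur cs' : List Char)
    (h : cur.all (fun d => d != '[' && d != ']') = true) :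
    pfsFindall ('[' :: (cur ++ '[' :: cs')) = pfsFindall ('[' :: cs') := by
  rw [pfsFindall]
  simp only [if_true]
  rw [pfs_drop_all cur '[' cs' h (by decide)]
  simp

lemma pfs_findall_lb_rb (cur cs' : List Char)
    (h : cur.all (fun d => d != '[' && d != ']') = true) :
    pfsFindall ('[' :: (cur ++ ']' :: cs')) = cur :: pfsFindall cs' := by
  rw [pfsFindall]
  simp only [if_true]
  rw [pfs_drop_all cur ']' cs' h (by decide), pfs_take_all cur ']' cs' h (by decide)]
  simp

lemma pfs_findall_lb_end (cur : List Char)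
    (h : cur.all (fun d => d != '[' && d != ']') = true) :
    pfsFindall ('[' :: cur) = [] := by
  rw [pfsFindall]
  simp only [if_true]
  have hd : cur.dropWhile (fun d => d != '[' && d != ']') = [] :=
    List.dropWhile_eq_nil_iff.mpr (by intro x hx; exact (List.all_eq_true.mp h x hx))
  rw [hd]
  simp [pfs_findall_nil]

lemma pfs_loop_emit : ∀ n cs, cs.length ≤ n →
    (∀ sel, pfsLoopA cs sel [] false = sel ++ pfsEmit cs) ∧
    (∀ sel cur, cur.all (fun d => d != '[' && d != ']') = true →
      pfsLoopA cs sel cur true = sel ++ pfsEmit ('[' :: (cur ++ cs))) := by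
  intro n
  induction n with
  | zero =>
    intro cs hle
    have hnil : cs = [] := by cases cs <;> simp_all
    subst hnil
    refine ⟨fun sel => by simp [pfsLoopA, pfsEmit, pfs_findall_nil], fun sel cur hcur => ?_⟩
    simp [pfsLoopA, pfsEmit, pfs_findall_lb_end cur hcur]
  | succ n ih =>
    intro cs hle
    cases cs with
    | nil =>
      refine ⟨fun sel => by simp [pfsLoopA, pfsEmit, pfs_findall_nil], fun sel cur hcur => ?_⟩
      simp [pfsLoopA, pfsEmit, pfs_findall_lb_end cur hcur]
    | cons c cs' =>
      have hlen : cs'.length ≤ n := by simp at hle; omega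
      constructor
      · intro sel
        by_cases hc1 : c = '['
        · subst hc1
          rw [show pfsLoopA ('[' :: cs') sel [] false = pfsLoopA cs' sel [] true from by
            simp [pfsLoopA]]
          have := (ih cs' hlen).2 sel [] (by simp)
          simpa using this
        · by_cases hc2 : c = ']'
          · subst hc2
            rw [show pfsLoopA (']' :: cs') sel [] false = pfsLoopA cs' sel [] false from by
              simp [pfsLoopA, PySem.Chars.strip]]
            rw [(ih cs' hlen).1 sel]; simp only [pfsEmit]; rw [pfs_findall_cons_ne ']' cs' (by decide)]
          · by_cases hc3 : c = ','
            · subst hc3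
              rw [show pfsLoopA (',' :: cs') sel [] false = pfsLoopA cs' sel [] false from by
                simp [pfsLoopA]]
              rw [(ih cs' hlen).1 sel]; simp only [pfsEmit]; rw [pfs_findall_cons_ne ',' cs' (by decide)]
            · rw [show pfsLoopA (c :: cs') sel [] false = pfsLoopA cs' sel [] false from by
                simp [pfsLoopA, hc1, hc2, hc3]]
              rw [(ih cs' hlen).1 sel]; simp only [pfsEmit]; rw [pfs_findall_cons_ne c cs' hc1]
      · intro sel cur hcur
        by_cases hc1 : c = '['
        · subst hc1
          rw [show pfsLoopA ('[' :: cs') sel cur true = pfsLoopA cs' sel [] true from by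
            simp [pfsLoopA]]
          rw [(ih cs' hlen).2 sel [] (by simp)]
          rw [pfsEmit, pfsEmit, pfs_findall_lb_lb cur cs' hcur]
          simp
        · by_cases hc2 : c = ']'
          · subst hc2
            rw [pfsEmit, pfs_findall_lb_rb cur cs' hcur]
            by_cases hs : PySem.Chars.strip cur = []
            · rw [show pfsLoopA (']' :: cs') sel cur true = pfsLoopA cs' sel [] false from by
                simp [pfsLoopA, hs]]
              rw [(ih cs' hlen).1 sel, pfsEmit]
              simp [hs]
            · rw [show pfsLoopA (']' :: cs') sel cur true
                  = pfsLoopA cs' (sel ++ [String.ofList (PySem.Chars.strip cur)]) [] false from by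
                simp [pfsLoopA, hs]]
              rw [(ih cs' hlen).1 (sel ++ [String.ofList (PySem.Chars.strip cur)]), pfsEmit]
              simp [hs]
          · have hp : (c != '[' && c != ']') = true := by
              simp [hc1, hc2]
            rw [show pfsLoopA (c :: cs') sel cur true = pfsLoopA cs' sel (cur ++ [c]) true from by
              simp [pfsLoopA, hc1, hc2]]
            rw [(ih cs' hlen).2 sel (cur ++ [c]) (by simp [List.all_append, hcur, hp])]
            simp

theorem parse_fallback_selectors_spec : Claim_equal_parse_fallback_selectors := by
  intro spec _
  unfold Spec_parse_fallback_selectors parse_fallback_selectors parse_fallback_selectors_alt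
  have h := (pfs_loop_emit (PySem.Str.strip spec).toList.length (PySem.Str.strip spec).toList le_rfl).1 []
  simp only [List.nil_append] at h
  simp only [h, pfsEmit]
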